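-- pv_equiv track=rewrite | github.com/tushcmd/dsa-tests | .history/calcResult_20240720041746.py | calc_result
-- ===== SOURCE A (Python) =====
-- def calc_result(cards):
--     score = 0
--     multiplier = 1
--     has_zero = '0' in cards
--     max_value = 0
--
--     for card in cards:
--         if card == 'x10':
--             multiplier *= 10
--         elif card.isdigit():
--             value = int(card)
--             if has_zero and value > max_value:
--                 max_value = value
--             score += value
--
--     if has_zero:
--         score = score - max_value
--
--
--     return score * multiplier
-- ===== SOURCE B (Python) =====
-- def calc_result(cards):
--     multiplier = 10 ** cards.count('x10')
--     digits = sorted(int(c) for c in cards if c.isdigit())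
--     if '0' in cards:
--         digits = digits[:-1]
--     return sum(digits) * multiplier
-- ===== Notes on version B (the rewrite author's own statement) =====
-- stated objective: alternative
-- what changed: Replaces A's single fused loop with running (score, multiplier, max_value) accumulators by a sort-then-drop strategy: count 'x10' once for the power-of-ten multiplier, sort the extracted digit values, and when '0' is present discard the last (largest) element of the sorted list instead of tracking a running maximum.
import Mathlib
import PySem

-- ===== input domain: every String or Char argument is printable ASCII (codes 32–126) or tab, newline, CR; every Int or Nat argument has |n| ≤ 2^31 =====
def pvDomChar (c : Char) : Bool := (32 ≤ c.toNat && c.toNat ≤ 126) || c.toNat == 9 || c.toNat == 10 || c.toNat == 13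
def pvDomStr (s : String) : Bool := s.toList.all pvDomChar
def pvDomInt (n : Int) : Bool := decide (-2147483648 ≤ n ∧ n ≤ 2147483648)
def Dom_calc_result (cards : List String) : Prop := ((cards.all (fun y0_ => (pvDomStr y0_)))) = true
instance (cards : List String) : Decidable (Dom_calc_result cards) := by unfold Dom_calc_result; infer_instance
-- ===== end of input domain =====

-- B replaces A's single fused loop with running (score, multiplier, max_value) accumulators by
-- count + sort-then-drop-the-last (largest) sorted digit when '0' is present; objective: alternative.

-- ===== PORT A =====
-- state (score, multiplier, max_value); has_zero = '0' in cards computed once, as in A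
def calc_result (cards : List String) : Int :=
  let has_zero := cards.contains "0"
  let st := cards.foldl (fun (st : Int × Int × Int) card =>
    if card = "x10" then (st.1, st.2.1 * 10, st.2.2)
    else if PySem.Str.strIsdigit card then
      if has_zero ∧ st.2.2 < (PySem.Int.ofStr? card).getD 0 then
        (st.1 + (PySem.Int.ofStr? card).getD 0, st.2.1, (PySem.Int.ofStr? card).getD 0)
      else (st.1 + (PySem.Int.ofStr? card).getD 0, st.2.1, st.2.2)
    else st) (0, 1, 0)
  let score := if has_zero then st.1 - st.2.2 else st.1
  score * st.2.1

-- ===== PORT B =====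
def calc_result_alt (cards : List String) : Int :=
  let multiplier : Int := 10 ^ (PySem.List.count cards "x10")
  let digits := PySem.List.sorted
    ((cards.filter (fun c => PySem.Str.strIsdigit c)).map (fun c => (PySem.Int.ofStr? c).getD 0))
    (fun y => y) false
  let digits := if cards.contains "0" then PySem.List.slice digits none (some (-1)) else digits
  digits.sum * multiplier

-- ===== PRECONDITION & SPEC =====
def Spec_calc_result (cards : List String) (out : Int) : Prop := out = calc_result_alt cards
instance (cards : List String) (out : Int) : Decidable (Spec_calc_result cards out) := by unfold Spec_calc_result; infer_instance

-- ===== CLAIM (what is proved, stated in full; the proofs are below) =====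
def Claim_equal_calc_result : Prop := ∀ (cards : List String), Dom_calc_result cards → Spec_calc_result cards (calc_result cards)

-- ===== LEMMAS AND PROOFS =====

-- the loop invariant: A's fold from state (s, m, x), expressed through sum / count / running max
theorem calc_loop_inv (hz : Bool) (cards : List String) (s m x : Int) :
    cards.foldl (fun (st : Int × Int × Int) card =>
      if card = "x10" then (st.1, st.2.1 * 10, st.2.2)
      else if PySem.Str.strIsdigit card then
        if hz ∧ st.2.2 < (PySem.Int.ofStr? card).getD 0 then
          (st.1 + (PySem.Int.ofStr? card).getD 0, st.2.1, (PySem.Int.ofStr? card).getD 0)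
        else (st.1 + (PySem.Int.ofStr? card).getD 0, st.2.1, st.2.2)
      else st) (s, m, x)
    = (s + ((cards.filter (fun c => PySem.Str.strIsdigit c)).map (fun c => (PySem.Int.ofStr? c).getD 0)).sum,
       m * 10 ^ (cards.count "x10"),
       if hz then ((cards.filter (fun c => PySem.Str.strIsdigit c)).map (fun c => (PySem.Int.ofStr? c).getD 0)).foldl max x else x) := by
  induction cards generalizing s m x with
  | nil => simp
  | cons c t ih =>
    rw [List.foldl_cons]
    by_cases hc : c = "x10"
    · subst hc
      have hnd : PySem.Chars.strIsdigit ['x','1','0'] = false := by decide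
      rw [if_pos rfl, ih]
      simp [hnd, pow_succ, mul_comm, mul_assoc]
    · rw [if_neg hc]
      by_cases hd : PySem.Str.strIsdigit c = true
      · have hd2 : PySem.Chars.strIsdigit c.toList = true := by simpa using hd
        rw [if_pos hd]
        cases hz with
        | false =>
          rw [if_neg (by simp), ih]
          simp [hd2, hc, add_assoc]
        | true =>
          by_cases hm : x < (PySem.Int.ofStr? c).getD 0
          · rw [if_pos ⟨rfl, hm⟩, ih]
            simp [hd2, hc, List.foldl_cons, max_eq_right hm.le, add_assoc]
          · rw [if_neg (by simp [hm]), ih]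
            simp [hd2, hc, List.foldl_cons, max_eq_left (not_lt.mp hm), add_assoc]
      · have hd' : PySem.Chars.strIsdigit c.toList = false := by simpa using hd
        rw [if_neg (by simp [hd']), ih]
        simp [hd', hc]

-- in a ≤-sorted list every element is at most the last one
theorem mem_le_getLast (s : List Int) (hp : s.Pairwise (· ≤ ·)) (h : s ≠ []) :
    ∀ x ∈ s, x ≤ s.getLast h := by
  induction s with
  | nil => simp at h
  | cons a t ih =>
    cases t with
    | nil => intro x hx; simp at hx; simp [hx, List.getLast]
    | cons b u =>
      have hpt := (List.pairwise_cons.mp hp).2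
      intro x hx
      rw [List.getLast_cons (by simp)]
      rcases List.mem_cons.mp hx with rfl | hxt
      · exact le_trans ((List.pairwise_cons.mp hp).1 b (by simp))
          (ih hpt (by simp) b (by simp))
      · exact ih hpt (by simp) x hxt

-- when "0" is among the cards, 0 is among the extracted digit values
theorem zero_mem_digits (cards : List String) (h : cards.contains "0" = true) :
    (0 : Int) ∈ (cards.filter (fun c => PySem.Str.strIsdigit c)).map (fun c => (PySem.Int.ofStr? c).getD 0) := by
  refine List.mem_map.mpr ⟨"0", List.mem_filter.mpr ⟨List.contains_iff_mem.mp h, by decide⟩, by decide⟩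

-- dropping the last element of sorted(l) removes A's running max (0 ∈ l)
theorem sum_dropLast_sorted (l : List Int) (h0 : (0 : Int) ∈ l) :
    (PySem.List.sorted l (fun y => y) false).dropLast.sum = l.sum - l.foldl max 0 := by
  set s := PySem.List.sorted l (fun y => y) false with hs
  have hperm : s.Perm l := PySem.List.sorted_perm l (fun y => y) false
  have hne : s ≠ [] := by
    intro he
    rw [he] at hperm
    simp [hperm.symm.eq_nil] at h0
  have hp : s.Pairwise (· ≤ ·) := by
    simpa using PySem.List.sorted_pairwise (xs := l) (key := fun y => y)
  have hlast : s.getLast hne = l.foldl max 0 := by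
    have hmem : s.getLast hne ∈ l := hperm.mem_iff.mp (List.getLast_mem hne)
    have h1 : s.getLast hne ≤ l.foldl max 0 := (PySem.List.le_foldl_max l 0).2 _ hmem
    have h2 : l.foldl max 0 ≤ s.getLast hne := by
      rcases PySem.List.foldl_max_mem l 0 with he | hm
      · rw [he]
        exact mem_le_getLast s hp hne 0 (hperm.mem_iff.mpr h0)
      · exact mem_le_getLast s hp hne _ (hperm.mem_iff.mpr hm)
    omega
  have hsplit : s.dropLast.sum + s.getLast hne = s.sum := by
    conv_rhs => rw [← List.dropLast_concat_getLast hne]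
    simp
  have hsum : s.sum = l.sum := hperm.sum_eq
  omega

-- ===== VERDICT (by name: the statement is the Claim_ definition above) =====
theorem calc_result_spec : Claim_equal_calc_result := by
  intro cards _
  unfold Spec_calc_result calc_result calc_result_alt
  simp only []
  rw [calc_loop_inv (cards.contains "0") cards 0 1 0]
  by_cases h0 : cards.contains "0" = true
  · rw [if_pos h0, if_pos h0, if_pos h0, PySem.List.slice_to_neg_one,
      sum_dropLast_sorted _ (zero_mem_digits cards h0)]
    simp [PySem.List.count_eq]
  · rw [if_neg h0, if_neg h0, if_neg h0,
      (PySem.List.sorted_perm _ (fun y => y) false).sum_eq]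
    simp [PySem.List.count_eq]
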